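-- pv_equiv track=rewrite | github.com/IdentityPython/pyFF | src/pyff/utils.py | ddist
-- ===== SOURCE A (Python) =====
-- def ddist(a, b):
--     if len(a) > len(b):
--         return ddist(b, a)
--
--     a = a.split('.')
--     b = b.split('.')
--
--     d = [x[0] == x[1] for x in zip(a[::-1], b[::-1])]
--     if False in d:
--         return d.index(False)
--     return len(a)
-- ===== SOURCE B (Python) =====
-- def ddist(a, b):
--     i, j = len(a), len(b)
--     while i and j and a[i - 1] == b[j - 1]:
--         i -= 1
--         j -= 1
--     n = a.count('.', i)
--     if (i == 0 or a[i - 1] == '.') and (j == 0 or b[j - 1] == '.'):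
--         n += 1
--     return n
-- ===== Notes on version B (the rewrite author's own statement) =====
-- stated objective: alternative
-- what changed: B never splits the strings: it finds the longest common character suffix with a two-pointer scan from the ends, returns the number of dots inside that suffix, plus one when both scan positions stop at a component boundary (start of string or just after a dot); A instead splits both strings on '.', zips the reversed part lists into a bool list and uses `False in d`/`d.index(False)`.
import Mathlib
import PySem

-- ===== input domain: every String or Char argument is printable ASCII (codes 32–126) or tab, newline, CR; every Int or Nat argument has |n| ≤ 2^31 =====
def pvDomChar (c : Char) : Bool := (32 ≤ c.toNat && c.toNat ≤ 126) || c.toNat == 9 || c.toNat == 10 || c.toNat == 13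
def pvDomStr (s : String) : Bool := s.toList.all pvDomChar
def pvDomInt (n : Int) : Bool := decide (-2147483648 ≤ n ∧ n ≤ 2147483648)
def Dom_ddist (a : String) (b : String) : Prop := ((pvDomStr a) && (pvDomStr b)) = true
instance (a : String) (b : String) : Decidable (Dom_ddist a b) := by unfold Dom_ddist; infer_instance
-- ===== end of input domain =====

-- B replaces A's split-on-'.'/zip-reversed/bool-list algorithm by a split-free two-pointer scan
-- from the string ends: count the dots inside the longest common character suffix, plus one when
-- both scan positions stop at a component boundary (objective: alternative, same cost).

-- ===== PORT A =====
-- else-branch of A's body (reached when len(a) <= len(b)); strings handled on the List Char side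
def ddistBody (a : String) (b : String) : Int :=
  let ap := PySem.Chars.splitOn a.toList ['.']      -- a = a.split('.')
  let bp := PySem.Chars.splitOn b.toList ['.']      -- b = b.split('.')
  let d := (((PySem.List.slice? ap none none (-1)).getD []).zip
            ((PySem.List.slice? bp none none (-1)).getD [])).map (fun x => x.1 == x.2)
  if d.contains false then ((PySem.List.index? d false).getD 0 : Int)   -- index exists: guarded by `False in d`
  else (ap.length : Int)

def ddist (a : String) (b : String) : Int :=
  if PySem.Str.len a > PySem.Str.len b then ddist b a
  else ddistBody a b
termination_by (PySem.Str.len a).toNat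
decreasing_by simp only [PySem.Str.len_eq] at *; omega

-- ===== PORT B =====
-- the while loop 'while i and j and a[i-1] == b[j-1]: i -= 1; j -= 1' run on the reversed char
-- lists: returns (matched common suffix chars, remaining a-chars, remaining b-chars)
def csLoop : List Char → List Char → List Char × List Char × List Char
  | x :: xs, y :: ys =>
      if x = y then
        let r := csLoop xs ys
        (x :: r.1, r.2.1, r.2.2)
      else ([], x :: xs, y :: ys)
  | xs, ys => ([], xs, ys)

def ddist_alt (a : String) (b : String) : Int :=
  let r := csLoop a.toList.reverse b.toList.reverse
  let n : Int := (r.1.count '.' : Int)                    -- n = a.count('.', i)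
  -- (i == 0 or a[i-1] == '.') and (j == 0 or b[j-1] == '.')
  if (r.2.1 = [] ∨ r.2.1.head? = some '.') ∧ (r.2.2 = [] ∨ r.2.2.head? = some '.') then n + 1
  else n

-- ===== PRECONDITION & SPEC =====
def Spec_ddist (a : String) (b : String) (out : Int) : Prop := out = ddist_alt a b
instance (a : String) (b : String) (out : Int) : Decidable (Spec_ddist a b out) := by unfold Spec_ddist; infer_instance

-- ===== CLAIM (what is proved, stated in full; the proofs are below) =====
def Claim_equal_ddist : Prop := ∀ (a : String) (b : String), Dom_ddist a b → Spec_ddist a b (ddist a b)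

-- ===== LEMMAS AND PROOFS =====

-- splitOn.go: result appends to acc.reverse a nonempty part list whose total length (parts plus separators) is cur.length + l.length
theorem splitOn_go_spec (sep : List Char) (hsep : sep ≠ []) :
    ∀ (fuel : Nat) (l cur : List Char) (acc : List (List Char)), l.length < fuel →
      ∃ T, PySem.Chars.splitOn.go sep fuel l cur acc = acc.reverse ++ T ∧ T ≠ [] ∧
        (T.map List.length).sum + (T.length - 1) * sep.length = cur.length + l.length := by
  intro fuel
  induction fuel with
  | zero => intro l cur acc h; omega
  | succ n ih =>
    intro l cur acc h
    match l with
    | [] =>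
      refine ⟨[cur.reverse], ?_, by simp, by simp⟩
      rw [PySem.Chars.splitOn.go]
      · simp
      · omega
    | c :: rest =>
      rw [PySem.Chars.splitOn.go]
      by_cases hp : sep.isPrefixOf (c :: rest)
      · simp only [hp, if_true]
        have hlen : sep.length ≤ (c :: rest).length :=
          (List.isPrefixOf_iff_prefix.mp hp).length_le
        have hs1 : 1 ≤ sep.length := List.length_pos_iff.mpr hsep
        obtain ⟨T, hT, hne, hsum⟩ := ih (List.drop sep.length (c :: rest)) [] (cur.reverse :: acc)
          (by simp only [List.length_drop]; simp at h ⊢; omega)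
        refine ⟨cur.reverse :: T, by simp [hT], by simp, ?_⟩
        have hT1 : 1 ≤ T.length := List.length_pos_iff.mpr hne
        have h2 : ((cur.reverse :: T).length - 1) * sep.length
            = (T.length - 1) * sep.length + sep.length := by
          rw [show (cur.reverse :: T).length - 1 = (T.length - 1) + 1 by simp [List.length_cons]; omega,
            Nat.add_mul, one_mul]
        simp only [List.map_cons, List.sum_cons, List.length_reverse, h2]
        simp only [List.length_drop, List.length_nil, List.length_cons] at hsum hlen ⊢
        omega
      · simp only [hp]
        obtain ⟨T, hT, hne, hsum⟩ := ih rest (c :: cur) acc (by simp at h ⊢; omega)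
        refine ⟨T, hT, hne, ?_⟩
        simp only [List.length_cons] at hsum ⊢
        omega

-- splitting on '.' : nonempty part list, and total part length + separator count = string length
theorem splitOn_dot_spec (s : List Char) :
    PySem.Chars.splitOn s ['.'] ≠ [] ∧
    ((PySem.Chars.splitOn s ['.']).map List.length).sum + ((PySem.Chars.splitOn s ['.']).length - 1) = s.length := by
  obtain ⟨T, hT, hne, hsum⟩ := splitOn_go_spec ['.'] (by simp) (s.length + 1) s [] [] (by omega)
  unfold PySem.Chars.splitOn
  rw [hT]
  simpa using And.intro hne (by simpa using hsum)

-- if every zipped pair matches and ys is no longer than xs, ys is a prefix of xs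
theorem prefix_of_zip_all_eq {α : Type} [BEq α] [LawfulBEq α] :
    ∀ (xs ys : List α), ys.length ≤ xs.length →
      ((xs.zip ys).map (fun x => x.1 == x.2)).contains false = false → ys <+: xs := by
  intro xs
  induction xs with
  | nil =>
    intro ys h _
    have : ys = [] := List.length_eq_zero_iff.mp (Nat.le_zero.mp h)
    simp [this]
  | cons x xt ih =>
    intro ys h hall
    cases ys with
    | nil => exact List.nil_prefix
    | cons y yt =>
      simp only [List.zip_cons_cons, List.map_cons, List.contains_cons, Bool.or_eq_false_iff] at hall
      obtain ⟨h1, h2⟩ := hall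
      have hxy : x = y := by
        by_contra hne
        simp [beq_eq_false_iff_ne.mpr hne] at h1
      subst hxy
      exact List.cons_prefix_cons.mpr ⟨rfl, ih yt (by simpa using h) h2⟩

-- proof-side recount of A's bool-list value: length of the matching prefix of the zipped pairs
def countMatch : List (List Char × List Char) → Int
  | [] => 0
  | (x, y) :: t => if x ≠ y then 0 else 1 + countMatch t

-- A's value (after the swap) as countMatch over the zipped reversed part lists
def aVal (a : String) (b : String) : Int :=
  countMatch ((PySem.Chars.splitOn a.toList ['.']).reverse.zip
              (PySem.Chars.splitOn b.toList ['.']).reverse)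

-- countMatch equals A's bool-list computation on the same zipped list
theorem countMatch_eq (l : List (List Char × List Char)) :
    countMatch l = if (l.map (fun x => x.1 == x.2)).contains false
      then ((PySem.List.index? (l.map (fun x => x.1 == x.2)) false).getD 0 : Int)
      else (l.length : Int) := by
  induction l with
  | nil => simp [countMatch]
  | cons p t ih =>
    obtain ⟨x, y⟩ := p
    simp only [List.map_cons]
    by_cases hxy : x = y
    · subst hxy
      rw [show countMatch ((x, x) :: t) = 1 + countMatch t by simp [countMatch], ih,
        show ((x == x) :: List.map (fun x => x.1 == x.2) t)
          = (true :: List.map (fun x => x.1 == x.2) t) by simp]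
      rw [show ((true :: List.map (fun x => x.1 == x.2) t).contains false)
          = ((List.map (fun x => x.1 == x.2) t).contains false) by simp]
      by_cases hc : (List.map (fun x => x.1 == x.2) t).contains false
      · rcases ho : List.idxOf? false (List.map (fun x => x.1 == x.2) t) with _ | i
        · exfalso
          rw [List.idxOf?_eq_none_iff] at ho
          simp only [List.contains_eq_mem, decide_eq_true_eq] at hc
          simpa using ho hc
        · simp only [hc, if_true, PySem.List.index?, List.idxOf?_cons, ho,
            show ((true : Bool) == false) = false by rfl, Bool.false_eq_true, if_false,
            Option.map_some, Option.getD_some]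
          push_cast; ring
      · simp only [hc, Bool.false_eq_true, if_false, List.length_cons]
        push_cast; ring
    · have hbe : (x == y) = false := beq_eq_false_iff_ne.mpr hxy
      rw [show countMatch ((x, y) :: t) = 0 by simp [countMatch, hxy], hbe]
      rw [show ((false :: List.map (fun x => x.1 == x.2) t).contains false) = true by simp]
      simp [PySem.List.index?, List.idxOf?_cons]

-- countMatch is symmetric in the two zipped lists
theorem countMatch_zip_comm : ∀ (xs ys : List (List Char)),
    countMatch (xs.zip ys) = countMatch (ys.zip xs) := by
  intro xs
  induction xs with
  | nil => intro ys; cases ys <;> simp [countMatch]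
  | cons x xt ih =>
    intro ys
    cases ys with
    | nil => simp [countMatch]
    | cons y yt =>
      simp only [List.zip_cons_cons, countMatch]
      rw [ih yt]
      by_cases h : x = y
      · subst h; rfl
      · simp [h, Ne.symm h]

theorem aVal_comm (a b : String) : aVal a b = aVal b a := by
  unfold aVal; exact countMatch_zip_comm _ _

-- the non-swap branch agrees with aVal when len(a) <= len(b)
theorem ddistBody_eq_aVal (a b : String) (h : a.toList.length ≤ b.toList.length) :
    ddistBody a b = aVal a b := by
  unfold ddistBody aVal
  simp only [PySem.List.slice?_none_none_neg_one, Option.getD_some]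
  rw [countMatch_eq]
  by_cases hc : (((PySem.Chars.splitOn a.toList ['.']).reverse.zip
      (PySem.Chars.splitOn b.toList ['.']).reverse).map (fun x => x.1 == x.2)).contains false
  · rw [if_pos hc, if_pos hc]
  · rw [if_neg hc, if_neg hc]
    -- all compared parts match: the a-part list cannot be longer than the b-part list
    obtain ⟨hne_a, hsum_a⟩ := splitOn_dot_spec a.toList
    obtain ⟨hne_b, hsum_b⟩ := splitOn_dot_spec b.toList
    have hle : (PySem.Chars.splitOn a.toList ['.']).length
        ≤ (PySem.Chars.splitOn b.toList ['.']).length := by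
      by_contra hgt'
      have hgt := lt_of_not_ge hgt'
      have hpre : (PySem.Chars.splitOn b.toList ['.']).reverse
          <+: (PySem.Chars.splitOn a.toList ['.']).reverse :=
        prefix_of_zip_all_eq _ _ (by simpa using Nat.le_of_lt hgt)
          (by simpa using hc)
      obtain ⟨t, ht⟩ := hpre
      have hpa_eq : t.reverse ++ PySem.Chars.splitOn b.toList ['.']
          = PySem.Chars.splitOn a.toList ['.'] := by
        simpa using congrArg List.reverse ht
      have htne : t ≠ [] := by
        intro h0
        rw [h0] at hpa_eq
        simp only [List.reverse_nil, List.nil_append] at hpa_eq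
        rw [← hpa_eq] at hgt
        omega
      have ht1 : 1 ≤ t.length := List.length_pos_iff.mpr htne
      rw [← hpa_eq] at hsum_a
      simp only [List.map_append, List.sum_append, List.length_append, List.length_reverse] at hsum_a
      have hb1 : 1 ≤ (PySem.Chars.splitOn b.toList ['.']).length := List.length_pos_iff.mpr hne_b
      omega
    rw [List.length_zip]
    simp only [List.length_reverse]
    rw [Nat.min_eq_left hle]

-- A's function computes aVal on every input
theorem ddist_eq_aVal (a b : String) : ddist a b = aVal a b := by
  rw [ddist]
  by_cases h : PySem.Str.len a > PySem.Str.len b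
  · simp only [h, if_pos]
    rw [ddist]
    have h' : ¬ PySem.Str.len b > PySem.Str.len a := by
      simp only [PySem.Str.len_eq] at *; omega
    simp only [h', if_false]
    rw [ddistBody_eq_aVal b a (by simp only [PySem.Str.len_eq] at h; exact_mod_cast le_of_lt h)]
    exact aVal_comm b a
  · simp only [h, if_false]
    exact ddistBody_eq_aVal a b (by simp only [PySem.Str.len_eq] at h; omega)

-- functional split on '.': (head part, remaining parts)
def psplit : List Char → List Char × List (List Char)
  | [] => ([], [])
  | c :: t =>
      let r := psplit t
      if c = '.' then ([], r.1 :: r.2) else (c :: r.1, r.2)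

-- the part list of psplit
def plist (s : List Char) : List (List Char) := (psplit s).1 :: (psplit s).2

-- the fueled splitOn.go computes psplit
theorem splitOn_go_psplit :
    ∀ (fuel : Nat) (l cur : List Char) (acc : List (List Char)), l.length < fuel →
      PySem.Chars.splitOn.go ['.'] fuel l cur acc
        = acc.reverse ++ (cur.reverse ++ (psplit l).1) :: (psplit l).2 := by
  intro fuel
  induction fuel with
  | zero => intro l cur acc h; omega
  | succ n ih =>
    intro l cur acc h
    match l with
    | [] =>
      rw [PySem.Chars.splitOn.go]
      · simp [psplit]
      · omega
    | c :: rest =>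
      rw [PySem.Chars.splitOn.go]
      by_cases hc : c = '.'
      · subst hc
        have hp : List.isPrefixOf ['.'] ('.' :: rest) = true := by simp [List.isPrefixOf]
        simp only [hp, if_true]
        rw [ih _ _ _ (by simp at h ⊢; omega)]
        simp [psplit]
      · have hp : List.isPrefixOf ['.'] (c :: rest) = false := by
          simp only [List.isPrefixOf, List.isPrefixOf_nil_left, Bool.and_eq_true,
            Bool.and_eq_false_iff, beq_eq_false_iff_ne, ne_eq]
          exact Or.inl fun h => hc h.symm
        simp only [hp, Bool.false_eq_true, if_false]
        rw [ih _ _ _ (by simp at h ⊢; omega)]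
        simp [psplit, hc]

theorem splitOn_eq_plist (s : List Char) : PySem.Chars.splitOn s ['.'] = plist s := by
  unfold PySem.Chars.splitOn plist
  rw [splitOn_go_psplit _ _ _ _ (by omega)]
  simp

-- replace the last element's content (nonempty lists)
def modLast : List (List Char) → Char → List (List Char)
  | [], _ => []
  | [h], c => [h ++ [c]]
  | h :: t, c => h :: modLast t c

theorem modLast_append_last (I : List (List Char)) (L : List Char) (c : Char) :
    modLast (I ++ [L]) c = I ++ [L ++ [c]] := by
  induction I with
  | nil => rfl
  | cons h t ih =>
    cases t with
    | nil => simp [modLast]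
    | cons h2 t2 =>
      simp only [List.cons_append] at ih
      simp only [List.cons_append, modLast, ih]

-- appending a dot at the end of the scanned list appends an empty part
theorem plist_append_dot : ∀ (r : List Char), plist (r ++ ['.']) = plist r ++ [[]] := by
  intro r
  induction r with
  | nil => rfl
  | cons x t ih =>
    simp only [List.cons_append, plist, psplit] at ih ⊢
    by_cases hx : x = '.'
    · simp only [hx, if_pos rfl]
      rw [show ((psplit (t ++ ['.'])).1 :: (psplit (t ++ ['.'])).2)
          = ((psplit t).1 :: (psplit t).2) ++ [[]] from ih]
      rfl
    · simp only [hx, if_neg, ite_false]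
      have h1 : (psplit (t ++ ['.'])).1 = (psplit t).1 := by
        have := List.head_eq_of_cons_eq ih; exact this
      have h2 : (psplit (t ++ ['.'])).2 = (psplit t).2 ++ [[]] := by
        have := List.tail_eq_of_cons_eq ih; simpa using this
      rw [h1, h2]

-- appending a non-dot char at the end of the scanned list appends it to the last part
theorem plist_append_chr : ∀ (r : List Char) (c : Char), c ≠ '.' →
    plist (r ++ [c]) = modLast (plist r) c := by
  intro r
  induction r with
  | nil => intro c hc; simp [plist, psplit, hc, modLast]
  | cons x t ih =>
    intro c hc
    have iht := ih c hc
    simp only [List.cons_append, plist, psplit] at iht ⊢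
    by_cases hx : x = '.'
    · simp only [hx, if_pos rfl]
      rw [show ((psplit (t ++ [c])).1 :: (psplit (t ++ [c])).2)
          = modLast ((psplit t).1 :: (psplit t).2) c from iht]
      cases h2 : (psplit t).2 with
      | nil => simp [modLast]
      | cons p ps => simp [modLast]
    · simp only [hx, if_neg, ite_false]
      cases h2 : (psplit t).2 with
      | nil =>
        rw [h2] at iht
        simp only [modLast] at iht
        have h1 : (psplit (t ++ [c])).1 = (psplit t).1 ++ [c] :=
          List.head_eq_of_cons_eq iht
        have h2' : (psplit (t ++ [c])).2 = [] := by
          have := List.tail_eq_of_cons_eq iht; simpa using this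
        rw [h1, h2', show modLast [x :: (psplit t).1] c = [(x :: (psplit t).1) ++ [c]] from rfl]
        simp
      | cons p ps =>
        rw [h2] at iht
        simp only [modLast] at iht
        have h1 : (psplit (t ++ [c])).1 = (psplit t).1 :=
          List.head_eq_of_cons_eq iht
        have h2' : (psplit (t ++ [c])).2 = modLast (p :: ps) c := by
          have := List.tail_eq_of_cons_eq iht; simpa using this
        rw [h1, h2']
        cases ps <;> rfl

-- splitting the reversed string = reversed part list with reversed parts
theorem plist_reverse : ∀ (s : List Char),
    plist s.reverse = (List.map List.reverse (plist s)).reverse := by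
  intro s
  induction s with
  | nil => rfl
  | cons c t ih =>
    rw [List.reverse_cons]
    by_cases hc : c = '.'
    · subst hc
      rw [plist_append_dot, ih]
      simp only [plist, psplit, if_pos rfl]
      simp
    · rw [plist_append_chr _ _ hc, ih]
      simp only [plist, psplit, hc, ite_false]
      rw [show List.map List.reverse ((psplit t).1 :: (psplit t).2)
          = List.map List.reverse (plist t) from rfl]
      have : (List.map List.reverse (plist t)).reverse
          = (List.map List.reverse (psplit t).2).reverse ++ [(psplit t).1.reverse] := by
        simp [plist]
      rw [this, modLast_append_last]
      simp

-- countMatch only compares components for equality: reversing every component on both sides preserves it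
theorem countMatch_map_rev : ∀ (P Q : List (List Char)),
    countMatch ((P.map List.reverse).zip (Q.map List.reverse)) = countMatch (P.zip Q) := by
  intro P
  induction P with
  | nil => intro Q; simp
  | cons p pt ih =>
    intro Q
    cases Q with
    | nil => simp
    | cons q qt =>
      simp only [List.map_cons, List.zip_cons_cons, countMatch, ih]
      by_cases h : p = q
      · subst h; simp
      · have : p.reverse ≠ q.reverse := fun he => h (by simpa using congrArg List.reverse he)
        simp [h, this]

-- countMatch is insensitive to extending both head components by the same char
theorem countMatch_cons_head (c : Char) (h h' : List Char) (l l' : List (List Char)) :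
    countMatch (((c :: h) :: l).zip ((c :: h') :: l')) = countMatch ((h :: l).zip (h' :: l')) := by
  simp only [List.zip_cons_cons, countMatch]
  by_cases he : h = h'
  · subst he; simp
  · have : (c :: h) ≠ (c :: h') := fun hx => he (by injection hx)
    simp [he, this]

-- the B-side value computed from the reversed char lists
def bCore (ra rb : List Char) : Int :=
  let r := csLoop ra rb
  let n : Int := (r.1.count '.' : Int)
  if (r.2.1 = [] ∨ r.2.1.head? = some '.') ∧ (r.2.2 = [] ∨ r.2.2.head? = some '.') then n + 1
  else n

-- main correspondence: countMatch over the reversed-side part lists = B's two-pointer value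
theorem countMatch_plist_eq_bCore : ∀ (ra rb : List Char),
    countMatch ((plist ra).zip (plist rb)) = bCore ra rb := by
  intro ra
  induction ra with
  | nil =>
    intro rb
    cases rb with
    | nil => simp [plist, psplit, countMatch, bCore, csLoop]
    | cons y ys =>
      by_cases hy : y = '.'
      · subst hy
        simp [plist, psplit, countMatch, bCore, csLoop]
      · simp [plist, psplit, hy, countMatch, bCore, csLoop]
  | cons x xs ih =>
    intro rb
    cases rb with
    | nil =>
      by_cases hx : x = '.'
      · subst hx
        simp [plist, psplit, countMatch, bCore, csLoop]
      · simp [plist, psplit, hx, countMatch, bCore, csLoop]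
    | cons y ys =>
      by_cases hx : x = '.'
      · subst hx
        by_cases hy : y = '.'
        · -- both dots: they match, one component boundary crossed on both sides
          subst hy
          have hih := ih ys
          have e1 : plist ('.' :: xs) = [] :: plist xs := rfl
          have e2 : plist ('.' :: ys) = [] :: plist ys := rfl
          have e3 : csLoop ('.' :: xs) ('.' :: ys)
              = ('.' :: (csLoop xs ys).1, (csLoop xs ys).2.1, (csLoop xs ys).2.2) := by
            simp [csLoop]
          rw [e1, e2, List.zip_cons_cons, countMatch]
          simp only [ne_eq, not_true_eq_false, if_false, hih]
          unfold bCore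
          rw [e3]
          dsimp only
          rw [show List.count '.' ('.' :: (csLoop xs ys).1)
              = List.count '.' (csLoop xs ys).1 + 1 by simp]
          split_ifs <;> push_cast <;> ring
        · -- '.' vs non-dot: head components [] vs y-started differ; no boundary on b
          have hne : ('.' : Char) ≠ y := fun h => hy h.symm
          simp [plist, psplit, hy, List.zip_cons_cons, countMatch, bCore, csLoop, hne]
      · by_cases hy : y = '.'
        · have hne : x ≠ y := fun h => hx (hy ▸ h)
          simp [plist, psplit, hx, List.zip_cons_cons, countMatch, bCore, csLoop, hne, hy]
        · by_cases hxy : x = y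
          · -- same non-dot char: both head components extend by it; value unchanged
            subst hxy
            have hih := ih ys
            have e1 : plist (x :: xs) = (x :: (psplit xs).1) :: (psplit xs).2 := by
              simp [plist, psplit, hx]
            have e2 : plist (x :: ys) = (x :: (psplit ys).1) :: (psplit ys).2 := by
              simp [plist, psplit, hx]
            have e3 : csLoop (x :: xs) (x :: ys)
                = (x :: (csLoop xs ys).1, (csLoop xs ys).2.1, (csLoop xs ys).2.2) := by
              simp [csLoop]
            rw [e1, e2, countMatch_cons_head,
              show ((psplit xs).1 :: (psplit xs).2) = plist xs from rfl,
              show ((psplit ys).1 :: (psplit ys).2) = plist ys from rfl, hih]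
            unfold bCore
            rw [e3]
            dsimp only
            rw [show List.count '.' (x :: (csLoop xs ys).1)
                = List.count '.' (csLoop xs ys).1 by simp [List.count_cons, hx]]
          · -- differing non-dot chars: head components differ, no boundary on either side
            simp only [plist, psplit, hx, hy, ite_false]
            have hne : (x :: (psplit xs).1) ≠ (y :: (psplit ys).1) :=
              fun h => hxy (by injection h)
            simp [List.zip_cons_cons, countMatch, hne, bCore, csLoop, hxy, hx, hy]

-- B's port computes bCore on the reversed char lists (definitional)
theorem ddist_alt_eq_bCore (a b : String) :
    ddist_alt a b = bCore a.toList.reverse b.toList.reverse := rfl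

-- chain: aVal = ddist_alt
theorem aVal_eq_ddist_alt (a b : String) : aVal a b = ddist_alt a b := by
  unfold aVal
  rw [splitOn_eq_plist, splitOn_eq_plist]
  have hrev : ∀ s : List Char, (plist s).reverse = List.map List.reverse (plist s.reverse) := by
    intro s
    rw [plist_reverse s]
    simp [Function.comp]
  rw [hrev, hrev, countMatch_map_rev, countMatch_plist_eq_bCore, ddist_alt_eq_bCore]

-- ===== VERDICT (by name: the statement is the Claim_ definition above) =====
theorem ddist_spec : Claim_equal_ddist := by
  intro a b _
  unfold Spec_ddist
  rw [ddist_eq_aVal, aVal_eq_ddist_alt]
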